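-- pv_equiv track=rewrite | github.com/TaiMingLu/tpu-vllm | sequence_kd_parquet_vllm.py | get_missing_row_ranges
-- ===== SOURCE A (Python) =====
-- from typing import List
--
-- def get_missing_row_ranges(completed_ranges, total_rows, chunk_size) -> List[tuple]:
--     """Calculate which row ranges still need processing.
--
--     Uses fixed chunk boundaries (0, chunk_size, 2*chunk_size, ...) but
--     only includes actually-missing rows within each chunk.
--     """
--     # Build set of all completed rows
--     completed_rows = set()
--     for start, end in completed_ranges:
--         for i in range(start, min(end, total_rows)):
--             completed_rows.add(i)
--
--     # Use fixed chunk boundaries, but only include missing rows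
--     missing = []
--     for chunk_start in range(0, total_rows, chunk_size):
--         chunk_end = min(chunk_start + chunk_size, total_rows)
--
--         # Find actually missing rows within this fixed chunk
--         missing_in_chunk = [i for i in range(chunk_start, chunk_end) if i not in completed_rows]
--
--         if missing_in_chunk:
--             # Use the actual range of missing rows
--             actual_start = missing_in_chunk[0]
--             actual_end = missing_in_chunk[-1] + 1
--             missing.append((actual_start, actual_end))
--
--     return missing
-- ===== SOURCE B (Python) =====
-- def get_missing_row_ranges(completed_ranges, total_rows, chunk_size):
--     """Interval arithmetic instead of per-row enumeration: clip, sort and merge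
--     the completed ranges into disjoint intervals, then compute each chunk's
--     first/last missing row directly from the merged intervals."""
--     clipped = sorted(((s, min(e, total_rows)) for s, e in completed_ranges
--                       if s < min(e, total_rows)), key=lambda p: p[0])
--     merged = []
--     for s, e in clipped:
--         if merged and s <= merged[-1][1]:
--             ls, le = merged[-1]
--             merged[-1] = (ls, max(le, e))
--         else:
--             merged.append((s, e))
--
--     missing = []
--     for chunk_start in range(0, total_rows, chunk_size):
--         chunk_end = min(chunk_start + chunk_size, total_rows)
--         a = chunk_start
--         for s, e in merged:          # at most one interval contains a
--             if s <= a < e: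
--                 a = e                # first row after the covering interval
--                 break
--         if a >= chunk_end:
--             continue
--         b = chunk_end - 1
--         for s, e in merged:
--             if s <= b < e:
--                 b = s - 1            # last row before the covering interval
--                 break
--         missing.append((a, b + 1))
--     return missing
-- ===== Notes on version B (the rewrite author's own statement) =====
-- stated objective: faster
-- what changed: Instead of materialising a set of every completed row and scanning every row of every chunk, B clips, sorts and merges the completed ranges into disjoint intervals and computes each chunk's first/last missing row by interval arithmetic, so cost no longer depends on how many rows the ranges cover.
import Mathlib
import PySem

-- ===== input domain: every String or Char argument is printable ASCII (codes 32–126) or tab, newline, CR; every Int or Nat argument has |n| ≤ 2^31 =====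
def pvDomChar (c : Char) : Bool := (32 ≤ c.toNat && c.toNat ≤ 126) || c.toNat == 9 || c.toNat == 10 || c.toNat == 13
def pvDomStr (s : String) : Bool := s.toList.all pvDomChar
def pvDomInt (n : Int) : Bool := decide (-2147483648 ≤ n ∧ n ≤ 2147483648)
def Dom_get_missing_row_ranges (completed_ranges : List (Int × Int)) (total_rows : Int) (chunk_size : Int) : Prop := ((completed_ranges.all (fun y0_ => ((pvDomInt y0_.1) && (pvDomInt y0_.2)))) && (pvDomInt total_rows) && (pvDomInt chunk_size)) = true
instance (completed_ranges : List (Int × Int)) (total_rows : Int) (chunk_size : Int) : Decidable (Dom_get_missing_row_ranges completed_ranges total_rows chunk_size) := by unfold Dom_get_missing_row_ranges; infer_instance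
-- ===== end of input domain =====

-- B replaces A's per-row set enumeration by sort-and-merge interval arithmetic (return value only; neither mutates its arguments).

-- ===== PORT A =====
def get_missing_row_ranges (completed_ranges : List (Int × Int)) (total_rows : Int) (chunk_size : Int) : List (Int × Int) :=
  -- completed_rows = set(); for start, end in completed_ranges: for i in range(start, min(end, total_rows)): completed_rows.add(i)
  let completed_rows : PySem.Set Int :=
    completed_ranges.foldl (fun st p =>
      (PySem.List.pyRange p.1 (min p.2 total_rows) 1).foldl (fun st i => PySem.Set.add st i) st)
      PySem.Set.empty
  -- for chunk_start in range(0, total_rows, chunk_size): …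
  (PySem.List.pyRange 0 total_rows chunk_size).foldl (fun missing chunk_start =>
    let chunk_end := min (chunk_start + chunk_size) total_rows
    match (PySem.List.pyRange chunk_start chunk_end 1).filter
        (fun i => !(PySem.Set.contains completed_rows i)) with
    | [] => missing
    | x :: rest => missing ++ [(x, (x :: rest).getLast (by simp) + 1)]) []

-- ===== PORT B =====
-- one merge step: fold body of Source B's `for s, e in clipped` loop
def pvMergeStep (m : List (Int × Int)) (p : Int × Int) : List (Int × Int) :=
  match m.getLast? with
  | some q => if p.1 ≤ q.2 then m.dropLast ++ [(q.1, max q.2 p.2)] else m ++ [p]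
  | none => [p]

def get_missing_row_ranges_alt (completed_ranges : List (Int × Int)) (total_rows : Int) (chunk_size : Int) : List (Int × Int) :=
  let clipped := PySem.List.sorted
    ((completed_ranges.map (fun p => (p.1, min p.2 total_rows))).filter (fun p => decide (p.1 < p.2)))
    (fun p => p.1) false
  let merged := clipped.foldl pvMergeStep []
  (PySem.List.pyRange 0 total_rows chunk_size).foldl (fun missing chunk_start =>
    let chunk_end := min (chunk_start + chunk_size) total_rows
    let a := match merged.find? (fun p => decide (p.1 ≤ chunk_start ∧ chunk_start < p.2)) with
             | some p => p.2
             | none => chunk_start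
    if chunk_end ≤ a then missing
    else
      let b := match merged.find? (fun p => decide (p.1 ≤ chunk_end - 1 ∧ chunk_end - 1 < p.2)) with
               | some p => p.1 - 1
               | none => chunk_end - 1
      missing ++ [(a, b + 1)]) []

-- ===== PRECONDITION & SPEC =====
-- Pre_ excludes only chunk_size = 0, on which Python's range(0, total_rows, 0) raises ValueError in A (and in B).
def Pre_get_missing_row_ranges (completed_ranges : List (Int × Int)) (total_rows : Int) (chunk_size : Int) : Prop := chunk_size ≠ 0
instance (completed_ranges : List (Int × Int)) (total_rows : Int) (chunk_size : Int) : Decidable (Pre_get_missing_row_ranges completed_ranges total_rows chunk_size) := by unfold Pre_get_missing_row_ranges; infer_instance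

def pvWitness_get_missing_row_ranges : (List (Int × Int)) × Int × Int := ([(0, 2), (5, 7)], 8, 3)

def Spec_get_missing_row_ranges (completed_ranges : List (Int × Int)) (total_rows : Int) (chunk_size : Int) (out : List (Int × Int)) : Prop := out = get_missing_row_ranges_alt completed_ranges total_rows chunk_size
instance (completed_ranges : List (Int × Int)) (total_rows : Int) (chunk_size : Int) (out : List (Int × Int)) : Decidable (Spec_get_missing_row_ranges completed_ranges total_rows chunk_size out) := by unfold Spec_get_missing_row_ranges; infer_instance

-- ===== CLAIM (what is proved, stated in full; the proofs are below) =====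
def Claim_equal_get_missing_row_ranges : Prop := ∀ (completed_ranges : List (Int × Int)) (total_rows : Int) (chunk_size : Int), Dom_get_missing_row_ranges completed_ranges total_rows chunk_size → Pre_get_missing_row_ranges completed_ranges total_rows chunk_size → Spec_get_missing_row_ranges completed_ranges total_rows chunk_size (get_missing_row_ranges completed_ranges total_rows chunk_size)

-- ===== LEMMAS AND PROOFS =====

-- membership in A's completed_rows set
lemma pv_mem_buildSet (L : List (Int × Int)) (T : Int) (st : PySem.Set Int) (i : Int) :
    i ∈ L.foldl (fun st p =>
      (PySem.List.pyRange p.1 (min p.2 T) 1).foldl (fun st i => PySem.Set.add st i) st) st ↔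
    i ∈ st ∨ ∃ p ∈ L, p.1 ≤ i ∧ i < min p.2 T := by
  induction L generalizing st with
  | nil => simp
  | cons p L ih =>
    have hupd : (PySem.List.pyRange p.1 (min p.2 T) 1).foldl (fun st i => PySem.Set.add st i) st
        = PySem.Set.update st (PySem.List.pyRange p.1 (min p.2 T) 1) := rfl
    simp only [List.foldl_cons, ih, hupd, PySem.Set.mem_update, PySem.List.mem_pyRange_one,
      List.mem_cons]
    constructor
    · rintro ((h | h) | ⟨q, hq, h⟩)
      · exact Or.inl h
      · exact Or.inr ⟨p, Or.inl rfl, h⟩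
      · exact Or.inr ⟨q, Or.inr hq, h⟩
    · rintro (h | ⟨q, (rfl | hq), h⟩)
      · exact Or.inl (Or.inl h)
      · exact Or.inl (Or.inr h)
      · exact Or.inr ⟨q, hq, h⟩

lemma pv_merge_inv (xs : List (Int × Int)) (m : List (Int × Int))
    (hm1 : ∀ p ∈ m, p.1 < p.2)
    (hm2 : m.Pairwise (fun p q => p.2 < q.1))
    (hx1 : ∀ q ∈ xs, q.1 < q.2)
    (hx2 : xs.Pairwise (fun p q => p.1 ≤ q.1))
    (hcross : ∀ p ∈ m, ∀ q ∈ xs, p.1 ≤ q.1) :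
    (∀ p ∈ xs.foldl pvMergeStep m, p.1 < p.2) ∧
    (xs.foldl pvMergeStep m).Pairwise (fun p q => p.2 < q.1) ∧
    (∀ i : Int, (∃ p ∈ xs.foldl pvMergeStep m, p.1 ≤ i ∧ i < p.2) ↔
      (∃ p ∈ m, p.1 ≤ i ∧ i < p.2) ∨ (∃ q ∈ xs, q.1 ≤ i ∧ i < q.2)) := by
  induction xs generalizing m with
  | nil => exact ⟨hm1, hm2, fun i => by simp⟩
  | cons x xs ih =>
    simp only [List.foldl_cons]
    have hx1' : ∀ q ∈ xs, q.1 < q.2 := fun q hq => hx1 q (List.mem_cons_of_mem _ hq)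
    have hx2' : xs.Pairwise (fun p q => p.1 ≤ q.1) := (List.pairwise_cons.mp hx2).2
    have hxle : ∀ q ∈ xs, x.1 ≤ q.1 := (List.pairwise_cons.mp hx2).1
    have hxx : x.1 < x.2 := hx1 x List.mem_cons_self
    have key : (∀ p ∈ pvMergeStep m x, p.1 < p.2) ∧
        (pvMergeStep m x).Pairwise (fun p q => p.2 < q.1) ∧
        (∀ p ∈ pvMergeStep m x, ∀ q ∈ xs, p.1 ≤ q.1) ∧
        (∀ i : Int, (∃ p ∈ pvMergeStep m x, p.1 ≤ i ∧ i < p.2) ↔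
          (∃ p ∈ m, p.1 ≤ i ∧ i < p.2) ∨ (x.1 ≤ i ∧ i < x.2)) := by
      unfold pvMergeStep
      match hlast : m.getLast? with
      | none =>
        have hm : m = [] := List.getLast?_eq_none_iff.mp hlast
        subst hm
        exact ⟨by simpa using hxx, by simp, by simpa using hxle, fun i => by simp⟩
      | some q =>
        obtain ⟨m', rfl⟩ := List.getLast?_eq_some_iff.mp hlast
        have hqm : q ∈ m' ++ [q] := by simp
        have hq12 : q.1 < q.2 := hm1 q hqm
        have hsep : ∀ p ∈ m', p.2 < q.1 := fun p hp =>
          (List.pairwise_append.mp hm2).2.2 p hp q (by simp)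
        have hm1' : ∀ p ∈ m', p.1 < p.2 := fun p hp => hm1 p (by simp [hp])
        have hm2' : m'.Pairwise (fun p q => p.2 < q.1) := (List.pairwise_append.mp hm2).1
        have hq1x : q.1 ≤ x.1 := hcross q hqm x List.mem_cons_self
        have hdl : (m' ++ [q]).dropLast = m' := by simp
        by_cases hle : x.1 ≤ q.2
        · simp only [hdl, if_pos hle]
          refine ⟨?_, ?_, ?_, ?_⟩
          · intro p hp
            rcases List.mem_append.mp hp with h | h
            · exact hm1' p h
            · rw [List.mem_singleton] at h; subst h; dsimp only; omega
          · rw [List.pairwise_append]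
            refine ⟨hm2', by simp, ?_⟩
            intro p hp b hb
            rw [List.mem_singleton] at hb; subst hb
            exact hsep p hp
          · intro p hp r hr
            rcases List.mem_append.mp hp with h | h
            · exact hcross p (by simp [h]) r (List.mem_cons_of_mem _ hr)
            · rw [List.mem_singleton] at h; subst h
              exact le_trans hq1x (hxle r hr)
          · intro i
            constructor
            · rintro ⟨p, hp, hi1, hi2⟩
              rcases List.mem_append.mp hp with h | h
              · exact Or.inl ⟨p, by simp [h], hi1, hi2⟩
              · rw [List.mem_singleton] at h; subst h
                dsimp only at hi1 hi2
                rcases lt_or_ge i q.2 with h2 | h2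
                · exact Or.inl ⟨q, hqm, hi1, h2⟩
                · exact Or.inr ⟨by omega, by omega⟩
            · have hmem : (q.1, max q.2 x.2) ∈ m' ++ [(q.1, max q.2 x.2)] := by simp
              rintro (⟨p, hp, hi1, hi2⟩ | ⟨hi1, hi2⟩)
              · rcases List.mem_append.mp hp with h | h
                · exact ⟨p, by simp [h], hi1, hi2⟩
                · rw [List.mem_singleton] at h
                  refine ⟨(q.1, max q.2 x.2), hmem, ?_, ?_⟩
                  · rw [h] at hi1; exact hi1
                  · rw [h] at hi2; dsimp only at hi2 ⊢; omega
              · exact ⟨(q.1, max q.2 x.2), hmem, by dsimp only; omega, by dsimp only; omega⟩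
        · simp only [if_neg hle]
          rw [not_le] at hle
          refine ⟨?_, ?_, ?_, ?_⟩
          · intro p hp
            rcases List.mem_append.mp hp with h | h
            · exact hm1 p h
            · rw [List.mem_singleton] at h; subst h; exact hxx
          · rw [List.pairwise_append]
            refine ⟨hm2, by simp, ?_⟩
            intro p hp b hb
            rw [List.mem_singleton] at hb; subst hb
            rcases List.mem_append.mp hp with h | h
            · exact lt_trans (hsep p h) (by omega)
            · rw [List.mem_singleton] at h; subst h; omega
          · intro p hp r hr
            rcases List.mem_append.mp hp with h | h
            · exact hcross p h r (List.mem_cons_of_mem _ hr)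
            · rw [List.mem_singleton] at h; subst h; exact hxle r hr
          · intro i
            constructor
            · rintro ⟨p, hp, hi1, hi2⟩
              rcases List.mem_append.mp hp with h | h
              · exact Or.inl ⟨p, h, hi1, hi2⟩
              · rw [List.mem_singleton] at h; subst h; exact Or.inr ⟨hi1, hi2⟩
            · rintro (⟨p, hp, hi1, hi2⟩ | ⟨hi1, hi2⟩)
              · refine ⟨p, ?_, hi1, hi2⟩
                rcases List.mem_append.mp hp with h | h
                · simp [h]
                · rw [List.mem_singleton] at h; simp [h]
              · exact ⟨x, by simp, hi1, hi2⟩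
    obtain ⟨k1, k2, k3, k4⟩ := key
    obtain ⟨r1, r2, r3⟩ := ih (pvMergeStep m x) k1 k2 hx1' hx2' k3
    refine ⟨r1, r2, ?_⟩
    intro i
    rw [r3 i, k4 i]
    simp only [List.mem_cons]
    constructor
    · rintro ((h | h) | h)
      · exact Or.inl h
      · exact Or.inr ⟨x, Or.inl rfl, h⟩
      · obtain ⟨q, hq, h⟩ := h; exact Or.inr ⟨q, Or.inr hq, h⟩
    · rintro (h | ⟨q, (rfl | hq), h⟩)
      · exact Or.inl (Or.inl h)
      · exact Or.inl (Or.inr h)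
      · exact Or.inr ⟨q, hq, h⟩

lemma pv_good_rel (M : List (Int × Int))
    (h2 : M.Pairwise (fun p q => p.2 < q.1))
    {p q : Int × Int} (hp : p ∈ M) (hq : q ∈ M) :
    p = q ∨ p.2 < q.1 ∨ q.2 < p.1 := by
  rw [List.mem_iff_getElem] at hp hq
  obtain ⟨i, hi, rfl⟩ := hp
  obtain ⟨j, hj, rfl⟩ := hq
  rcases lt_trichotomy i j with h | h | h
  · exact Or.inr (Or.inl (List.pairwise_iff_getElem.mp h2 i j hi hj h))
  · subst h; exact Or.inl rfl
  · exact Or.inr (Or.inr (List.pairwise_iff_getElem.mp h2 j i hj hi h))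

lemma pv_filter_head (P : Int → Bool) (cs ce a : Int)
    (h1 : cs ≤ a) (h2 : a < ce) (hP : P a = true)
    (hbelow : ∀ y, cs ≤ y → y < a → P y = false) :
    (PySem.List.pyRange cs ce 1).filter P = a :: (PySem.List.pyRange (a+1) ce 1).filter P := by
  rw [PySem.List.pyRange_one_append cs a ce h1 (le_of_lt h2), List.filter_append]
  have hnil : (PySem.List.pyRange cs a 1).filter P = [] := by
    rw [List.filter_eq_nil_iff]
    intro y hy
    rw [PySem.List.mem_pyRange_one] at hy
    simp [hbelow y hy.1 hy.2]
  rw [hnil, List.nil_append, PySem.List.pyRange_one_cons h2, List.filter_cons, hP]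
  simp

lemma pv_filter_last (P : Int → Bool) (cs ce b : Int)
    (hcs : cs ≤ b) (hb : b < ce) (hP : P b = true)
    (habove : ∀ y, b < y → y < ce → P y = false) :
    ∃ l, (PySem.List.pyRange cs ce 1).filter P = l ++ [b] := by
  refine ⟨(PySem.List.pyRange cs b 1).filter P, ?_⟩
  rw [PySem.List.pyRange_one_append cs (b+1) ce (by omega) (by omega), List.filter_append]
  have hnil : (PySem.List.pyRange (b+1) ce 1).filter P = [] := by
    rw [List.filter_eq_nil_iff]
    intro y hy
    rw [PySem.List.mem_pyRange_one] at hy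
    simp [habove y (by omega) hy.2]
  rw [hnil, List.append_nil, PySem.List.pyRange_one_succ_right hcs, List.filter_append,
    List.filter_cons, hP]
  simp

lemma pv_chunk (M : List (Int × Int))
    (h1 : ∀ p ∈ M, p.1 < p.2)
    (h2 : M.Pairwise (fun p q => p.2 < q.1))
    (cs ce : Int) :
    (match (PySem.List.pyRange cs ce 1).filter
        (fun i => !(M.any (fun p => decide (p.1 ≤ i ∧ i < p.2)))) with
     | [] => ([] : List (Int × Int))
     | x :: rest => [(x, (x :: rest).getLast (by simp) + 1)])
    = (let a := match M.find? (fun p => decide (p.1 ≤ cs ∧ cs < p.2)) with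
                | some p => p.2
                | none => cs
       if ce ≤ a then [] else
         let b := match M.find? (fun p => decide (p.1 ≤ ce - 1 ∧ ce - 1 < p.2)) with
                  | some p => p.1 - 1
                  | none => ce - 1
         [(a, b + 1)]) := by
  have hcov : ∀ i : Int, (M.any (fun p => decide (p.1 ≤ i ∧ i < p.2)) = true) ↔
      ∃ p ∈ M, p.1 ≤ i ∧ i < p.2 := by
    intro i; simp
  -- characterise B's `a`
  obtain ⟨a, ha, ha0, ha1, ha2⟩ :
      ∃ a, (match M.find? (fun p => decide (p.1 ≤ cs ∧ cs < p.2)) with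
            | some p => p.2 | none => cs) = a ∧
        cs ≤ a ∧ ¬(∃ p ∈ M, p.1 ≤ a ∧ a < p.2) ∧ (∀ y, cs ≤ y → y < a → ∃ p ∈ M, p.1 ≤ y ∧ y < p.2) := by
    cases hfa : M.find? (fun p => decide (p.1 ≤ cs ∧ cs < p.2)) with
    | none =>
      refine ⟨cs, rfl, le_refl _, ?_, by omega⟩
      rintro ⟨p, hp, hc1, hc2⟩
      have := List.find?_eq_none.mp hfa p hp
      simp at this
      omega
    | some p =>
      have hpm : p ∈ M := List.mem_of_find?_eq_some hfa
      have hpc : p.1 ≤ cs ∧ cs < p.2 := by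
        have := List.find?_some hfa; simpa using this
      refine ⟨p.2, rfl, by omega, ?_, ?_⟩
      · rintro ⟨q, hq, hc1, hc2⟩
        rcases pv_good_rel M h2 hpm hq with h | h | h
        · subst h; omega
        · omega
        · have := h1 p hpm; omega
      · intro y hy1 hy2
        exact ⟨p, hpm, by omega, hy2⟩
  rw [ha]
  by_cases hce : ce ≤ a
  · rw [if_pos hce]
    have hnil : (PySem.List.pyRange cs ce 1).filter
        (fun i => !(M.any (fun p => decide (p.1 ≤ i ∧ i < p.2)))) = [] := by
      rw [List.filter_eq_nil_iff]
      intro y hy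
      rw [PySem.List.mem_pyRange_one] at hy
      have h6 := (hcov y).mpr (ha2 y hy.1 (by omega))
      intro hcon
      rw [Bool.not_eq_true'] at hcon
      rw [hcon] at h6
      exact Bool.false_ne_true h6
    rw [hnil]
  · rw [if_neg hce]
    have hace : a < ce := by omega
    -- characterise B's `b`
    obtain ⟨b, hb, hb3, hb1, hb2⟩ :
        ∃ b, (match M.find? (fun p => decide (p.1 ≤ ce - 1 ∧ ce - 1 < p.2)) with
              | some p => p.1 - 1 | none => ce - 1) = b ∧
          b < ce ∧ ¬(∃ p ∈ M, p.1 ≤ b ∧ b < p.2) ∧ (∀ y, b < y → y < ce → ∃ p ∈ M, p.1 ≤ y ∧ y < p.2) := by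
      cases hfb : M.find? (fun p => decide (p.1 ≤ ce - 1 ∧ ce - 1 < p.2)) with
      | none =>
        refine ⟨ce - 1, rfl, by omega, ?_, by omega⟩
        rintro ⟨p, hp, hc1, hc2⟩
        have := List.find?_eq_none.mp hfb p hp
        simp at this
        omega
      | some q =>
        have hqm : q ∈ M := List.mem_of_find?_eq_some hfb
        have hqc : q.1 ≤ ce - 1 ∧ ce - 1 < q.2 := by
          have := List.find?_some hfb; simpa using this
        refine ⟨q.1 - 1, rfl, by omega, ?_, ?_⟩
        · rintro ⟨p, hp, hc1, hc2⟩
          rcases pv_good_rel M h2 hqm hp with h | h | h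
          · subst h; omega
          · have := h1 p hp; omega
          · omega
        · intro y hy1 hy2
          exact ⟨q, hqm, by omega, by omega⟩
    rw [hb]
    have hab : a ≤ b := by
      by_contra hcon
      exact ha1 (hb2 a (by omega) hace)
    -- the filtered range is a :: … and ends with b
    have hP : ∀ y, (¬∃ p ∈ M, p.1 ≤ y ∧ y < p.2) →
        ((fun i => !(M.any (fun p => decide (p.1 ≤ i ∧ i < p.2)))) y = true) := by
      intro y hy
      simp only [Bool.not_eq_true']
      exact Bool.not_eq_true _ ▸ (by simpa using fun h => hy ((hcov y).mp h))
    have hPf : ∀ y, (∃ p ∈ M, p.1 ≤ y ∧ y < p.2) →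
        ((fun i => !(M.any (fun p => decide (p.1 ≤ i ∧ i < p.2)))) y = false) := by
      intro y hy
      have h6 := (hcov y).mpr hy
      simp only [Bool.not_eq_false']
      exact h6
    have hhead := pv_filter_head _ cs ce a ha0 hace (hP a ha1)
      (fun y hy1 hy2 => hPf y (ha2 y hy1 hy2))
    obtain ⟨l, hlast⟩ := pv_filter_last
      (fun i => !(M.any (fun p => decide (p.1 ≤ i ∧ i < p.2)))) cs ce b (by omega) hb3
      (hP b hb1) (fun y hy1 hy2 => hPf y (hb2 y hy1 hy2))
    rw [hhead]
    show [(a, (a :: (PySem.List.pyRange (a+1) ce 1).filter _).getLast (by simp) + 1)] = [(a, b + 1)]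
    have hlb : (a :: (PySem.List.pyRange (a+1) ce 1).filter
        (fun i => !(M.any (fun p => decide (p.1 ≤ i ∧ i < p.2))))).getLast (by simp) = b := by
      have h5 : (a :: (PySem.List.pyRange (a+1) ce 1).filter
          (fun i => !(M.any (fun p => decide (p.1 ≤ i ∧ i < p.2))))).getLast? = some b := by
        rw [← hhead, hlast, List.getLast?_concat]
      rw [List.getLast?_eq_some_getLast (by simp)] at h5
      exact Option.some.inj h5
    rw [hlb]


-- ===== VERDICT (by name: the statement is the Claim_ definition above) =====
theorem get_missing_row_ranges_spec : Claim_equal_get_missing_row_ranges := by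
  intro L T csz _ _
  unfold Spec_get_missing_row_ranges get_missing_row_ranges get_missing_row_ranges_alt
  simp only []
  set S := PySem.List.sorted
    ((L.map (fun p => (p.1, min p.2 T))).filter (fun p => decide (p.1 < p.2))) (fun p => p.1) false
    with hSdef
  set M := S.foldl pvMergeStep [] with hMdef
  have hS1 : ∀ q ∈ S, q.1 < q.2 := by
    intro q hq
    rw [hSdef, PySem.List.mem_sorted, List.mem_filter] at hq
    exact of_decide_eq_true hq.2
  have hS2 : S.Pairwise (fun p q => p.1 ≤ q.1) := by
    rw [hSdef]
    exact PySem.List.sorted_pairwise _ (fun p : Int × Int => p.1)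
  obtain ⟨hM1, hM2, hMcov⟩ := pv_merge_inv S [] (by simp) (by simp) hS1 hS2 (by simp)
  rw [← hMdef] at hM1 hM2 hMcov
  -- the merged intervals cover exactly A's completed rows
  have hsetM : ∀ i : Int, PySem.Set.contains
      (L.foldl (fun st p =>
        (PySem.List.pyRange p.1 (min p.2 T) 1).foldl (fun st i => PySem.Set.add st i) st)
        PySem.Set.empty) i
      = M.any (fun p => decide (p.1 ≤ i ∧ i < p.2)) := by
    intro i
    rw [Bool.eq_iff_iff, PySem.Set.contains_iff, pv_mem_buildSet, List.any_eq_true]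
    have hcl : (∃ q ∈ S, q.1 ≤ i ∧ i < q.2) ↔ ∃ p ∈ L, p.1 ≤ i ∧ i < min p.2 T := by
      constructor
      · rintro ⟨q, hq, hi1, hi2⟩
        rw [hSdef, PySem.List.mem_sorted, List.mem_filter, List.mem_map] at hq
        obtain ⟨⟨p, hp, rfl⟩, _⟩ := hq
        exact ⟨p, hp, hi1, hi2⟩
      · rintro ⟨p, hp, hi1, hi2⟩
        refine ⟨(p.1, min p.2 T), ?_, hi1, hi2⟩
        rw [hSdef, PySem.List.mem_sorted, List.mem_filter]
        exact ⟨List.mem_map.mpr ⟨p, hp, rfl⟩, by simp only; exact decide_eq_true (by omega)⟩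
    have hMS := hMcov i
    simp only [List.not_mem_nil, false_and, exists_false, false_or] at hMS
    constructor
    · rintro (h | h)
      · simp [PySem.Set.empty] at h
      · obtain ⟨p, hp, h⟩ := (hMS.mpr (hcl.mpr h))
        exact ⟨p, hp, decide_eq_true h⟩
    · rintro ⟨p, hp, h⟩
      exact Or.inr (hcl.mp (hMS.mp ⟨p, hp, of_decide_eq_true h⟩))
  -- the two per-chunk step functions agree
  have hstep : (fun (missing : List (Int × Int)) (chunk_start : Int) =>
      match (PySem.List.pyRange chunk_start (min (chunk_start + csz) T) 1).filter
          (fun i => !(PySem.Set.contains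
            (L.foldl (fun st p =>
              (PySem.List.pyRange p.1 (min p.2 T) 1).foldl (fun st i => PySem.Set.add st i) st)
              PySem.Set.empty) i)) with
      | [] => missing
      | x :: rest => missing ++ [(x, (x :: rest).getLast (by simp) + 1)])
      = (fun (missing : List (Int × Int)) (chunk_start : Int) =>
      let a := match M.find? (fun p => decide (p.1 ≤ chunk_start ∧ chunk_start < p.2)) with
               | some p => p.2
               | none => chunk_start
      if min (chunk_start + csz) T ≤ a then missing
      else
        let b := match M.find? (fun p => decide (p.1 ≤ min (chunk_start + csz) T - 1 ∧
                     min (chunk_start + csz) T - 1 < p.2)) with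
                 | some p => p.1 - 1
                 | none => min (chunk_start + csz) T - 1
        missing ++ [(a, b + 1)]) := by
    funext missing cs
    have hpred : (fun i => !(PySem.Set.contains
        (L.foldl (fun st p =>
          (PySem.List.pyRange p.1 (min p.2 T) 1).foldl (fun st i => PySem.Set.add st i) st)
          PySem.Set.empty) i))
        = (fun i => !(M.any (fun p => decide (p.1 ≤ i ∧ i < p.2)))) := by
      funext i; rw [hsetM i]
    rw [hpred]
    have h := pv_chunk M hM1 hM2 cs (min (cs + csz) T)
    have eA : (match (PySem.List.pyRange cs (min (cs + csz) T) 1).filter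
          (fun i => !(M.any (fun p => decide (p.1 ≤ i ∧ i < p.2)))) with
        | [] => missing
        | x :: rest => missing ++ [(x, (x :: rest).getLast (by simp) + 1)])
        = missing ++ (match (PySem.List.pyRange cs (min (cs + csz) T) 1).filter
          (fun i => !(M.any (fun p => decide (p.1 ≤ i ∧ i < p.2)))) with
        | [] => []
        | x :: rest => [(x, (x :: rest).getLast (by simp) + 1)]) := by
      cases (PySem.List.pyRange cs (min (cs + csz) T) 1).filter
          (fun i => !(M.any (fun p => decide (p.1 ≤ i ∧ i < p.2)))) <;> simp
    rw [eA, h]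
    by_cases hif : min (cs + csz) T ≤
        (match M.find? (fun p => decide (p.1 ≤ cs ∧ cs < p.2)) with
         | some p => p.2
         | none => cs)
    · simp only [if_pos hif, List.append_nil]
    · simp only [if_neg hif]
  rw [hstep]
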